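-- pv_equiv track=rewrite | github.com/chriswhittle/pokerbots-2022 | analysis/infoset_functions.py | key_is_facing_bet
-- ===== SOURCE A (Python) =====
-- PLAYER_SHIFT = 1
--
-- STREET_SHIFT = 2
--
-- CARD_SHIFT = 13
--
-- ACTION_SHIFT = 3
--
-- def key_is_facing_bet(key):
--     key = key >> (PLAYER_SHIFT+STREET_SHIFT+CARD_SHIFT)
--
--     if key == 0:
--         return True
--
--     while key != 0:
--         last_action = key % (2**ACTION_SHIFT)
--         key = key >> ACTION_SHIFT
--
--     return last_action > 2
-- ===== SOURCE B (Python) =====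
-- PLAYER_SHIFT = 1
--
-- STREET_SHIFT = 2
--
-- CARD_SHIFT = 13
--
-- ACTION_SHIFT = 3
--
-- def key_is_facing_bet(key):
--     key >>= PLAYER_SHIFT + STREET_SHIFT + CARD_SHIFT
--
--     if key == 0:
--         return True
--
--     shift = ((key.bit_length() - 1) // ACTION_SHIFT) * ACTION_SHIFT
--     return (key >> shift) > 2
-- ===== Notes on version B (the rewrite author's own statement) =====
-- stated objective: simpler
-- what changed: Replaces the while-loop that strips 3-bit chunks until the key is exhausted by a closed form: bit_length() locates the most significant 3-bit group, which a single shift extracts.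
import Mathlib
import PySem

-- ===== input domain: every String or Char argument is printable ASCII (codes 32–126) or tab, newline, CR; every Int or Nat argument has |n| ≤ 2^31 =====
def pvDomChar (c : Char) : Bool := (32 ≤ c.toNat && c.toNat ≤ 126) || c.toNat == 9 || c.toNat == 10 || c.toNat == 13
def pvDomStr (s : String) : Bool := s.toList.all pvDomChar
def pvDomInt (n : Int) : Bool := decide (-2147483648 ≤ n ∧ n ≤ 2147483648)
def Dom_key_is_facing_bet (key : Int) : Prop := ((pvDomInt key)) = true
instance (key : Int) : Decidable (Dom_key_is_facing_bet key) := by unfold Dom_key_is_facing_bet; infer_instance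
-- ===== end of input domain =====

-- B replaces A's chunk-stripping while-loop by a closed form: bit_length locates the
-- most significant 3-bit action group, which one shift extracts (objective: simpler).

-- ===== PORT A =====
-- A's while-loop: last_action := key % 8; key := key >> 3; repeat while key ≠ 0.
-- Fuel makes the recursion total; k.toNat iterations always suffice on the inputs
-- Pre_ admits (key ≥ 0), where Python's loop terminates.
def pvLoopA : Nat → Int → Int → Int
  | 0, _, last => last
  | fuel + 1, k, last =>
      if k ≠ 0 then pvLoopA fuel (k >>> (3 : Nat)) (PySem.Int.mod k (2 ^ 3)) else last

def key_is_facing_bet (key : Int) : Bool :=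
  let k := key >>> ((1 + 2 + 13 : Nat))
  if k = 0 then true
  else decide (pvLoopA k.toNat k 0 > 2)

-- ===== PORT B =====
def key_is_facing_bet_alt (key : Int) : Bool :=
  let k := key >>> ((1 + 2 + 13 : Nat))
  if k = 0 then true
  else
    let shift := ((PySem.Int.bitLength k - 1) / 3) * 3
    decide (k >>> (shift : Nat) > 2)

-- ===== PRECONDITION & SPEC =====
-- Pre_ excludes negative keys: there A's while-loop never terminates (key >> 3 stays -1).
def Pre_key_is_facing_bet (key : Int) : Prop := 0 ≤ key
instance (key : Int) : Decidable (Pre_key_is_facing_bet key) := by unfold Pre_key_is_facing_bet; infer_instance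
def pvWitness_key_is_facing_bet : Int := (458752)

def Spec_key_is_facing_bet (key : Int) (out : Bool) : Prop := out = key_is_facing_bet_alt key
instance (key : Int) (out : Bool) : Decidable (Spec_key_is_facing_bet key out) := by unfold Spec_key_is_facing_bet; infer_instance

-- ===== CLAIM (what is proved, stated in full; the proofs are below) =====
def Claim_equal_key_is_facing_bet : Prop := ∀ (key : Int), Dom_key_is_facing_bet key → Pre_key_is_facing_bet key → Spec_key_is_facing_bet key (key_is_facing_bet key)

-- ===== LEMMAS AND PROOFS =====

theorem pvShift_natCast (n k : Nat) : ((n : Int) >>> k) = ((n >>> k : Nat) : Int) := by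
  rw [Int.shiftRight_eq_div_pow, Nat.shiftRight_eq_div_pow]
  norm_cast

theorem pvLoopA_zero (fuel : Nat) (last : Int) : pvLoopA fuel 0 last = last := by
  cases fuel <;> simp [pvLoopA]

theorem pvBitLen_lt (n : Nat) (h : 8 ≤ n) : 4 ≤ PySem.Int.bitLength (n : Int) := by
  by_contra hc
  have hb : (n : Int).natAbs < 2 ^ PySem.Int.bitLength (n : Int) :=
    PySem.Int.lt_two_pow_bitLength _
  have ha : (n : Int).natAbs = n := Int.natAbs_natCast n
  have h2 : (2 : Nat) ^ PySem.Int.bitLength (n : Int) ≤ 2 ^ 3 :=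
    Nat.pow_le_pow_right (by omega) (by omega)
  omega

theorem pvBitLen_small (n : Nat) (h0 : 0 < n) (h : n < 8) :
    PySem.Int.bitLength (n : Int) ≤ 3 := by
  have hne : (n : Int) ≠ 0 := by exact_mod_cast Nat.pos_iff_ne_zero.mp h0
  have hb : 2 ^ (PySem.Int.bitLength (n : Int) - 1) ≤ (n : Int).natAbs :=
    PySem.Int.two_pow_bitLength_le _ hne
  have ha : (n : Int).natAbs = n := Int.natAbs_natCast n
  by_contra hc
  have h2 : (2 : Nat) ^ 3 ≤ 2 ^ (PySem.Int.bitLength (n : Int) - 1) :=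
    Nat.pow_le_pow_right (by omega) (by omega)
  omega

theorem pvBitLen_div8 (n : Nat) (h : 8 ≤ n) :
    PySem.Int.bitLength ((n / 8 : Nat) : Int) + 3 = PySem.Int.bitLength (n : Int) := by
  have h1 := PySem.Int.bitLength_natCast (m := n) (by omega)
  have h2 := PySem.Int.bitLength_natCast (m := n / 2) (by omega)
  have h3 := PySem.Int.bitLength_natCast (m := n / 2 / 2) (by omega)
  have e1 : n / 2 / 2 / 2 = n / 8 := by omega
  have e2 : n / 2 / 2 = n / 4 := by omega
  rw [h1, h2, h3, e1]

-- A's loop extracts the most significant 3-bit group of its (positive) argument.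
theorem pvLoopA_top (fuel : Nat) : ∀ (n : Nat) (last : Int), 0 < n → n ≤ fuel →
    pvLoopA fuel (n : Int) last =
      ((n / 8 ^ ((PySem.Int.bitLength (n : Int) - 1) / 3) : Nat) : Int) := by
  induction fuel with
  | zero => intro n last h0 hf; omega
  | succ fuel ih =>
    intro n last h0 hf
    have hne : (n : Int) ≠ 0 := by exact_mod_cast Nat.pos_iff_ne_zero.mp h0
    have hdiv : n >>> 3 = n / 8 := by rw [Nat.shiftRight_eq_div_pow]
    have hstep : pvLoopA (fuel + 1) (n : Int) last =
        pvLoopA fuel ((n / 8 : Nat) : Int) ((n % 8 : Nat) : Int) := by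
      simp [pvLoopA, pvShift_natCast, hdiv]
      exact fun h => absurd h (by omega)
    by_cases h8 : n < 8
    · have hd : n / 8 = 0 := Nat.div_eq_of_lt h8
      have hm : n % 8 = n := Nat.mod_eq_of_lt h8
      have hbl : (PySem.Int.bitLength (n : Int) - 1) / 3 = 0 := by
        have := pvBitLen_small n h0 h8
        omega
      rw [hstep, hd, hm]
      simp [pvLoopA_zero, hbl]
    · have h8' : 8 ≤ n := by omega
      have hd0 : 0 < n / 8 := Nat.div_pos (by omega) (by omega)
      have hdlt : n / 8 < n := Nat.div_lt_self h0 (by omega)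
      rw [hstep, ih (n / 8) _ hd0 (by omega)]
      have hbl := pvBitLen_div8 n h8'
      have h4 := pvBitLen_lt n h8'
      have hq : (PySem.Int.bitLength ((n / 8 : Nat) : Int) - 1) / 3 + 1 =
          (PySem.Int.bitLength (n : Int) - 1) / 3 := by omega
      congr 1
      rw [Nat.div_div_eq_div_mul, ← Nat.pow_succ', ← hq]

theorem key_is_facing_bet_eq (key : Int) (hk : 0 ≤ key) :
    key_is_facing_bet key = key_is_facing_bet_alt key := by
  obtain ⟨m, rfl⟩ : ∃ m : Nat, key = (m : Int) := ⟨key.toNat, by omega⟩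
  by_cases h0 : m >>> (1 + 2 + 13) = 0
  · simp [key_is_facing_bet, key_is_facing_bet_alt, pvShift_natCast, h0]
  · have hne : ((m >>> (1 + 2 + 13) : Nat) : Int) ≠ 0 := by exact_mod_cast h0
    have hpos : 0 < m >>> (1 + 2 + 13) := Nat.pos_of_ne_zero h0
    simp only [key_is_facing_bet, key_is_facing_bet_alt, pvShift_natCast, hne, if_neg,
      not_false_eq_true, Int.toNat_natCast]
    rw [pvLoopA_top _ _ 0 hpos (le_refl _)]
    have hsh : m >>> (1 + 2 + 13) >>>
          ((PySem.Int.bitLength ((m >>> (1 + 2 + 13) : Nat) : Int) - 1) / 3 * 3) =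
        m >>> (1 + 2 + 13) / 8 ^ ((PySem.Int.bitLength ((m >>> (1 + 2 + 13) : Nat) : Int) - 1) / 3) := by
      rw [Nat.shiftRight_eq_div_pow]
      congr 1
      rw [pow_mul']
      norm_num
    rw [hsh]

-- ===== VERDICT (by name: the statement is the Claim_ definition above) =====
theorem key_is_facing_bet_spec : Claim_equal_key_is_facing_bet := by
  intro key _ hpre
  unfold Spec_key_is_facing_bet
  exact key_is_facing_bet_eq key hpre
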